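-- pv_equiv track=rewrite | github.com/ssshhh0402/Y.C.S.T | PG/모의고사.py | solution
-- ===== SOURCE A (Python) =====
-- def solution(answers):
--     answer = []
--     a = [0, 1, 2, 3, 4, 5]
--     b = [0, 2, 1, 2, 3, 2, 4, 2, 5]
--     c = [0, 3, 3, 1, 1, 2, 2, 4, 4, 5, 5]
--     score = [0, 0, 0]
--     i = 0
--     i_a = 1
--     i_b = 1
--     i_c = 1
--     while i != len(answers):
--         if answers[i] == a[i_a]:
--             score[0] += 1
--         if answers[i] == b[i_b]:
--             score[1] += 1
--         if answers[i] == c[i_c]: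
--             score[2] += 1
--
--         i += 1
--         i_a += 1
--         if i_a == len(a):
--             i_a = 1
--         i_b += 1
--         if i_b == len(b):
--             i_b = 1
--         i_c += 1
--         if i_c == len(c):
--             i_c = 1
--     max_score = max(score)
--     for idx in range(3):
--         if score[idx] == max_score:
--             answer.append(idx+1)
--     return answer
-- ===== SOURCE B (Python) =====
-- def solution(answers):
--     # One pass builds a frequency table keyed by (position mod 40, answer);
--     # 40 is the common period of the three answer-key cycles, so each score is
--     # just 40 table lookups against a precomputed full-period key row.
--     freq = {}
--     for i, ans in enumerate(answers):
--         k = (i % 40, ans)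
--         freq[k] = freq.get(k, 0) + 1
--     rows = [[1, 2, 3, 4, 5] * 8,
--             [2, 1, 2, 3, 2, 4, 2, 5] * 5,
--             [3, 3, 1, 1, 2, 2, 4, 4, 5, 5] * 4]
--     scores = [sum(freq.get((m, v), 0) for m, v in enumerate(row)) for row in rows]
--     best = max(scores)
--     return [k + 1 for k, s in enumerate(scores) if s == best]
-- ===== Notes on version B (the rewrite author's own statement) =====
-- stated objective: alternative
-- what changed: Instead of A's fused loop comparing every answer against three manually rotated pattern counters, B builds a hash counter keyed by (index mod 40, answer) in one pass (40 = common period of the three key cycles) and obtains each score as 40 dictionary lookups against a precomputed full-period key row.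
import Mathlib
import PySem

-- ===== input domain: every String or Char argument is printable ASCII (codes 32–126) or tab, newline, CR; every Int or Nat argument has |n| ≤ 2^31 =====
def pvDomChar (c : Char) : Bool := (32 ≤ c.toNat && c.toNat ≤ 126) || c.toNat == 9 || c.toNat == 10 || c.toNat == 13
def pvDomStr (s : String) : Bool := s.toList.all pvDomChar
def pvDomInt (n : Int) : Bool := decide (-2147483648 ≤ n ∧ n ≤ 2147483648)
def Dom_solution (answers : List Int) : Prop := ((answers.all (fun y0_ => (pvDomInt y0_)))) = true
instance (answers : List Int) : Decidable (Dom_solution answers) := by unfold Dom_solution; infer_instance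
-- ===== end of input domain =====

-- B replaces A's fused loop with rotating pattern counters by a one-pass hash
-- counter keyed by (index mod 40, answer) plus 40 lookups per full-period key row.

-- ===== PORT A =====
-- A's while-loop: one pass over `answers` carrying three scores and three cycling
-- 1-based indices into the padded key lists a, b, c.
def solutionLoop (aL bL cL : List Int) : List Int → (Int × Int × Int) → Nat → Nat → Nat → Int × Int × Int
  | [], s, _, _, _ => s
  | x :: rest, (s0, s1, s2), ia, ib, ic =>
    let s0 := if x = aL.getD ia 0 then s0 + 1 else s0
    let s1 := if x = bL.getD ib 0 then s1 + 1 else s1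
    let s2 := if x = cL.getD ic 0 then s2 + 1 else s2
    let ia := if ia + 1 = aL.length then 1 else ia + 1
    let ib := if ib + 1 = bL.length then 1 else ib + 1
    let ic := if ic + 1 = cL.length then 1 else ic + 1
    solutionLoop aL bL cL rest (s0, s1, s2) ia ib ic

def solution (answers : List Int) : List Int :=
  let aL : List Int := [0, 1, 2, 3, 4, 5]
  let bL : List Int := [0, 2, 1, 2, 3, 2, 4, 2, 5]
  let cL : List Int := [0, 3, 3, 1, 1, 2, 2, 4, 4, 5, 5]
  let s := solutionLoop aL bL cL answers (0, 0, 0) 1 1 1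
  let score : List Int := [s.1, s.2.1, s.2.2]
  let maxScore := (PySem.List.max? score (fun y => y)).getD 0
  (List.range 3).foldl (fun acc idx => if score.getD idx 0 = maxScore then acc ++ [(idx : Int) + 1] else acc) []

-- ===== PORT B =====
-- freq[k] = freq.get(k, 0) + 1 over enumerate(answers), key (i % 40, ans)
def freqOf (answers : List Int) : PySem.Dict (Int × Int) Int :=
  answers.zipIdx.foldl
    (fun d p => d.insert (((p.2 : Int)) % 40, p.1) (d.getD (((p.2 : Int)) % 40, p.1) 0 + 1))
    PySem.Dict.empty

-- sum(freq.get((m, v), 0) for m, v in enumerate(row))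
def rowScore (freq : PySem.Dict (Int × Int) Int) (row : List Int) : Int :=
  row.zipIdx.foldl (fun s q => s + freq.getD (((q.2 : Int)), q.1) 0) 0

def solution_alt (answers : List Int) : List Int :=
  let freq := freqOf answers
  let rows : List (List Int) :=
    [(List.replicate 8 [1, 2, 3, 4, 5]).flatten,
     (List.replicate 5 [2, 1, 2, 3, 2, 4, 2, 5]).flatten,
     (List.replicate 4 [3, 3, 1, 1, 2, 2, 4, 4, 5, 5]).flatten]
  let scores : List Int := rows.map (rowScore freq)
  let best := (PySem.List.max? scores (fun y => y)).getD 0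
  (scores.zipIdx.filter (fun p => p.1 == best)).map (fun p => ((p.2 : Int) + 1))

-- ===== PRECONDITION & SPEC =====
def Spec_solution (answers : List Int) (out : List Int) : Prop := out = solution_alt answers
instance (answers : List Int) (out : List Int) : Decidable (Spec_solution answers out) := by unfold Spec_solution; infer_instance

-- ===== CLAIM (what is proved, stated in full; the proofs are below) =====
def Claim_equal_solution : Prop := ∀ (answers : List Int), Dom_solution answers → Spec_solution answers (solution answers)

-- ===== LEMMAS AND PROOFS =====

-- number of matches of `answers` (from position n on) against the cycle `pat`
def cnt (pat : List Int) (n : Nat) : List Int → Int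
  | [] => 0
  | x :: r => (if x = pat.getD (n % pat.length) 0 then 1 else 0) + cnt pat (n + 1) r

lemma loop_eq : ∀ (xs : List Int) (n : Nat) (s0 s1 s2 : Int),
    solutionLoop [0, 1, 2, 3, 4, 5] [0, 2, 1, 2, 3, 2, 4, 2, 5] [0, 3, 3, 1, 1, 2, 2, 4, 4, 5, 5]
        xs (s0, s1, s2) (n % 5 + 1) (n % 8 + 1) (n % 10 + 1)
      = (s0 + cnt [1, 2, 3, 4, 5] n xs,
         s1 + cnt [2, 1, 2, 3, 2, 4, 2, 5] n xs,
         s2 + cnt [3, 3, 1, 1, 2, 2, 4, 4, 5, 5] n xs) := by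
  intro xs
  induction xs with
  | nil => intro n s0 s1 s2; simp [solutionLoop, cnt]
  | cons x r ih =>
    intro n s0 s1 s2
    have ia' : (if n % 5 + 1 + 1 = 6 then 1 else n % 5 + 1 + 1) = (n + 1) % 5 + 1 := by
      split <;> omega
    have ib' : (if n % 8 + 1 + 1 = 9 then 1 else n % 8 + 1 + 1) = (n + 1) % 8 + 1 := by
      split <;> omega
    have ic' : (if n % 10 + 1 + 1 = 11 then 1 else n % 10 + 1 + 1) = (n + 1) % 10 + 1 := by
      split <;> omega
    simp only [solutionLoop, List.length_cons, List.length_nil]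
    norm_num
    rw [ia', ib', ic', ih (n + 1)]
    simp only [cnt, List.length_cons, List.length_nil, List.getD, Prod.mk.injEq]
    norm_num
    refine ⟨?_, ?_, ?_⟩ <;> split <;> ring

-- freq lookup = how often (i % 40, ans) occurs among the enumerated answers
lemma freq_getD (answers : List Int) (k : Int × Int) :
    (freqOf answers).getD k 0
      = ((answers.zipIdx.map (fun p => ((((p.2 : Nat)) : Int) % 40, p.1))).count k : Int) := by
  have main : ∀ (l : List (Int × Nat)) (d : PySem.Dict (Int × Int) Int),
      (l.foldl (fun d p => d.insert (((p.2 : Int)) % 40, p.1) (d.getD (((p.2 : Int)) % 40, p.1) 0 + 1)) d).getD k 0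
        = d.getD k 0 + ((l.map (fun p => ((((p.2 : Nat)) : Int) % 40, p.1))).count k : Int) := by
    intro l
    induction l with
    | nil => intro d; simp
    | cons p r ih =>
      intro d
      rw [List.foldl_cons, ih, List.map_cons, List.count_cons]
      by_cases h : ((((p.2 : Nat)) : Int) % 40, p.1) = k
      · subst h
        rw [PySem.Dict.getD, PySem.Dict.get?_insert_self]
        simp
        ring
      · rw [PySem.Dict.getD, PySem.Dict.get?_insert_of_ne, ← PySem.Dict.getD]
        · simp [h]
        · exact fun hc => h (by simpa using hc.symm)
  unfold freqOf
  rw [main]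
  simp [PySem.Dict.getD, PySem.Dict.get?, PySem.Dict.empty]

-- indicator sum over an enumerated row picks out at most one position
lemma sum_ind : ∀ (row : List Int) (k j : Nat) (x : Int),
    ((row.zipIdx k).map (fun q => if (((q.2 : Nat) : Int), q.1) = (((j : Nat) : Int), x) then (1 : Int) else 0)).sum
      = if k ≤ j ∧ j - k < row.length ∧ x = row.getD (j - k) 0 then 1 else 0 := by
  intro row
  induction row with
  | nil => intro k j x; simp
  | cons y r ih =>
    intro k j x
    rw [List.zipIdx_cons, List.map_cons, List.sum_cons, ih (k + 1)]
    by_cases hk : j = k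
    · subst hk
      have h1 : ¬ (j + 1 ≤ j) := by omega
      simp only [h1, false_and, if_false, Nat.sub_self, List.getD_cons_zero, Prod.mk.injEq]
      by_cases hx : x = y <;> simp [hx, eq_comm]; omega
    · have h0 : ¬ (((k : Int), y) = ((j : Int), x)) := by
        simp only [Prod.mk.injEq, not_and]
        intro h; exact absurd (by exact_mod_cast h.symm) hk
      simp only [h0, if_false, zero_add]
      by_cases h2 : k + 1 ≤ j
      · have hd : j - k = (j - (k + 1)) + 1 := by omega
        have : (y :: r).getD (j - k) 0 = r.getD (j - (k + 1)) 0 := by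
          rw [hd]; simp
        rw [this]
        have : (k ≤ j) = True := by simp; omega
        simp only [this, true_and, h2, List.length_cons]
        have hlt : (j - (k + 1) < r.length) ↔ (j - k < r.length + 1) := by omega
        simp [hlt]
      · have hA : ¬ (k ≤ j) := by omega
        simp [h2, hA]

-- summing the counter over a full-period row equals the cycle-match count
lemma rowScore_eq (row : List Int) (hlen : row.length = 40) :
    ∀ (xs : List Int) (n : Nat),
      ((row.zipIdx).map (fun q =>
          (((xs.zipIdx n).map (fun p => ((((p.2 : Nat)) : Int) % 40, p.1))).count ((((q.2 : Nat)) : Int), q.1) : Int))).sum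
        = cnt row n xs := by
  intro xs
  induction xs with
  | nil => intro n; simp [cnt]
  | cons x r ih =>
    intro n
    rw [List.zipIdx_cons, List.map_cons]
    simp only [List.count_cons]
    have hsplit : ∀ (f g : Int × Nat → Int),
        ((row.zipIdx).map (fun q => f q + g q)).sum
          = ((row.zipIdx).map f).sum + ((row.zipIdx).map g).sum := by
      intro f g
      induction (row.zipIdx) with
      | nil => simp
      | cons a l ihl => simp [ihl]; ring
    have hcast : ∀ (f g : Int × Nat → Nat),
        ((row.zipIdx).map (fun q => ((f q + g q : Nat) : Int))).sum
          = ((row.zipIdx).map (fun q => ((f q : Nat) : Int))).sum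
            + ((row.zipIdx).map (fun q => ((g q : Nat) : Int))).sum := by
      intro f g
      rw [show (fun q => ((f q + g q : Nat) : Int))
            = (fun q => ((f q : Nat) : Int) + ((g q : Nat) : Int)) from
          funext (fun q => by push_cast; ring)]
      exact hsplit _ _
    rw [hcast (fun q => ((r.zipIdx (n + 1)).map (fun p => ((((p.2 : Nat)) : Int) % 40, p.1))).count (((q.2 : Nat) : Int), q.1))
             (fun q => if (((n : Nat) : Int) % 40, x) == (((q.2 : Nat) : Int), q.1) then 1 else 0)]
    rw [ih (n + 1)]
    have hmod : ((n : Nat) : Int) % 40 = (((n % 40 : Nat)) : Int) := by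
      push_cast; omega
    have hind :
        ((row.zipIdx).map (fun q => ((((if (((n : Nat) : Int) % 40, x) == (((q.2 : Nat) : Int), q.1) then 1 else 0 : Nat)) : Int)))).sum
          = if x = row.getD (n % 40) 0 then 1 else 0 := by
      have hb : n % 40 < 40 := by omega
      have hs := sum_ind row 0 (n % 40) x
      simp only [Nat.zero_le, Nat.sub_zero, true_and, hlen, hb] at hs
      rw [← hs]
      congr 1
      refine List.map_congr_left ?_
      intro q _
      rw [hmod]
      simp only [beq_iff_eq, Nat.cast_ite, Nat.cast_one, Nat.cast_zero]
      exact if_congr eq_comm rfl rfl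
    rw [hind]
    simp only [cnt, hlen]
    ring

lemma tail_eq (c0 c1 c2 m : Int) :
    (List.range 3).foldl
        (fun acc idx => if ([c0, c1, c2] : List Int).getD idx 0 = m then acc ++ [(idx : Int) + 1] else acc) []
      = ((([c0, c1, c2] : List Int).zipIdx.filter (fun p => p.1 == m)).map (fun p => ((p.2 : Int) + 1))) := by
  by_cases h0 : c0 = m <;> by_cases h1 : c1 = m <;> by_cases h2 : c2 = m <;>
    simp [List.range_succ, List.zipIdx, h0, h1, h2]

-- counting against the full-period row = counting against the short cycle
lemma cnt_congr (row pat : List Int)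
    (h : ∀ n, row.getD (n % row.length) 0 = pat.getD (n % pat.length) 0) :
    ∀ (xs : List Int) (n : Nat), cnt row n xs = cnt pat n xs := by
  intro xs
  induction xs with
  | nil => intro n; simp [cnt]
  | cons x r ih => intro n; simp only [cnt, h n, ih (n + 1)]

lemma rowScore_foldl (freq : PySem.Dict (Int × Int) Int) (row : List Int) :
    rowScore freq row = ((row.zipIdx).map (fun q => freq.getD (((q.2 : Int)), q.1) 0)).sum := by
  unfold rowScore
  induction (row.zipIdx) using List.reverseRecOn with
  | nil => simp
  | append_singleton l a ihl => simp [ihl]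

lemma score_eq (answers row : List Int) (hlen : row.length = 40) :
    rowScore (freqOf answers) row = cnt row 0 answers := by
  rw [rowScore_foldl]
  rw [show (fun q : Int × Nat => (freqOf answers).getD (((q.2 : Int)), q.1) 0)
        = (fun q : Int × Nat =>
            (((answers.zipIdx.map (fun p => ((((p.2 : Nat)) : Int) % 40, p.1))).count
                (((q.2 : Nat) : Int), q.1)) : Int)) from
      funext (fun q => freq_getD answers _)]
  exact rowScore_eq row hlen answers 0

lemma cnt_row (row pat : List Int) (hr : row.length = 40) (L : Nat) (hp : pat.length = L)
    (hdvd : L ∣ 40)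
    (key : ∀ m, m < 40 → row.getD m 0 = pat.getD (m % L) 0) :
    ∀ xs n, cnt row n xs = cnt pat n xs := by
  refine cnt_congr row pat ?_
  intro n
  rw [hr, hp]
  have hb : n % 40 < 40 := by omega
  have hm : n % L = (n % 40) % L := (Nat.mod_mod_of_dvd n hdvd).symm
  rw [hm]
  exact key _ hb

theorem solution_eq_alt (answers : List Int) : solution answers = solution_alt answers := by
  have h := loop_eq answers 0 0 0 0
  norm_num at h
  have e1 : rowScore (freqOf answers) ((List.replicate 8 [1, 2, 3, 4, 5]).flatten)
      = cnt [1, 2, 3, 4, 5] 0 answers := by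
    rw [score_eq answers _ (by decide)]
    exact cnt_row _ _ (by decide) 5 (by decide) (by decide) (by decide) answers 0
  have e2 : rowScore (freqOf answers) ((List.replicate 5 [2, 1, 2, 3, 2, 4, 2, 5]).flatten)
      = cnt [2, 1, 2, 3, 2, 4, 2, 5] 0 answers := by
    rw [score_eq answers _ (by decide)]
    exact cnt_row _ _ (by decide) 8 (by decide) (by decide) (by decide) answers 0
  have e3 : rowScore (freqOf answers) ((List.replicate 4 [3, 3, 1, 1, 2, 2, 4, 4, 5, 5]).flatten)
      = cnt [3, 3, 1, 1, 2, 2, 4, 4, 5, 5] 0 answers := by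
    rw [score_eq answers _ (by decide)]
    exact cnt_row _ _ (by decide) 10 (by decide) (by decide) (by decide) answers 0
  unfold solution solution_alt
  simp only [List.map, e1, e2, e3, h, PySem.List.max?_id_cons, Option.getD_some]
  exact tail_eq _ _ _ _

-- ===== VERDICT (by name: the statement is the Claim_ definition above) =====
theorem solution_spec : Claim_equal_solution := by
  intro answers _
  unfold Spec_solution
  exact solution_eq_alt answers
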